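-- pv_equiv track=rewrite | github.com/PARK4139/task_orchestrator_cli | pkg_py/refactor/pk_ensure_file_contents_filled_with_auto_no_option2.py | pk_ensure_file_contents_filled_with_auto_no_option2
-- ===== SOURCE A (Python) =====
-- def pk_ensure_file_contents_filled_with_auto_no_option2(template_str: str, word_monitored: str, auto_cnt_starting_no=0):
--     """
--     input
--     --------
--     -----1--
--     ---1----
--     ---1----
--     -------1
--     ouput
--     --------
--     -----1--
--     ---2----
--     ---3----
--     -------4
--     """
--     line_splited_by_word_monitored_list = template_str.split(word_monitored)
--
--     line_list_filtered = []
--     for index, line_splited_by_word_monitored in enumerate(line_splited_by_word_monitored_list):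
--         if index != len(line_splited_by_word_monitored_list) - 1:
--             line_list_filtered.append(line_splited_by_word_monitored + str(auto_cnt_starting_no))
--             auto_cnt_starting_no = auto_cnt_starting_no + 1
--         else:
--             line_list_filtered.append(line_splited_by_word_monitored)
--     lines_new_as_str = "".join(line_list_filtered)
--     return lines_new_as_str
-- ===== SOURCE B (Python) =====
-- def pk_ensure_file_contents_filled_with_auto_no_option2(template_str: str, word_monitored: str, auto_cnt_starting_no=0):
--     if word_monitored == "":
--         raise ValueError("empty separator")
--     out = []
--     pos = 0
--     cnt = auto_cnt_starting_no
--     while True: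
--         i = template_str.find(word_monitored, pos)
--         if i == -1:
--             out.append(template_str[pos:])
--             break
--         out.append(template_str[pos:i])
--         out.append(str(cnt))
--         cnt += 1
--         pos = i + len(word_monitored)
--     return "".join(out)
-- ===== Notes on version B (the rewrite author's own statement) =====
-- stated objective: alternative
-- what changed: Replaced A's split-into-a-list-of-segments-then-rejoin by a single cursor scan that repeatedly calls str.find from the current position, emitting the slice before each hit plus the counter, with no intermediate segment list.
-- outside the precondition, e.g. on pk_ensure_file_contents_filled_with_auto_no_option2('ab', '', 0): A raises ValueError, B raises ValueError
import Mathlib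
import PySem

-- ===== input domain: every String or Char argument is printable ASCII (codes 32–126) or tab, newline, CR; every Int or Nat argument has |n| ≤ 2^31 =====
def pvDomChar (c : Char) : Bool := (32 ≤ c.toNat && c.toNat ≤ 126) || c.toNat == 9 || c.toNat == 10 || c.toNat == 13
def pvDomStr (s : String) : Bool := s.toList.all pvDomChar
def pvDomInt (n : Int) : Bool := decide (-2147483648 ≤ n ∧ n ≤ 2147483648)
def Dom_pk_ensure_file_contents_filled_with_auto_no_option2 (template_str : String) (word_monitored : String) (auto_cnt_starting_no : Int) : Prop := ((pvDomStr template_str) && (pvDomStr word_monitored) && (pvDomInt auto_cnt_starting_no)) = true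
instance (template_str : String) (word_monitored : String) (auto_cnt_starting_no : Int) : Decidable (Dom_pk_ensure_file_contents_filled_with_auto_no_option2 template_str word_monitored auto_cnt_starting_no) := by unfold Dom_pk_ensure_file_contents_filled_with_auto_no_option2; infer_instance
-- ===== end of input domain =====

-- B replaces A's split-into-a-list-then-rejoin by a single cursor scan with str.find
-- (alternative decomposition, same exact output); on word_monitored = "" both raise ValueError.

-- ===== PORT A =====
-- A: split template_str on word_monitored, append str(counter) to every piece but the
-- last (incrementing the counter), join with "".
def pk_ensure_file_contents_filled_with_auto_no_option2 (template_str : String) (word_monitored : String) (auto_cnt_starting_no : Int) : String :=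
  match PySem.Str.split? template_str word_monitored with
  | none => ""   -- Python raises ValueError (empty separator) here; excluded by Pre_
  | some parts =>
    let st := (PySem.List.enumerate parts).foldl
      (fun (st : Int × List String) ip =>
        if ip.1 ≠ (parts.length : Int) - 1 then
          (st.1 + 1, st.2 ++ [ip.2 ++ PySem.Int.toStr st.1])
        else
          (st.1, st.2 ++ [ip.2]))
      (auto_cnt_starting_no, [])
    PySem.Str.join "" st.2

-- ===== PORT B =====
-- B's while-loop: find the next occurrence from the cursor, emit the slice before it and
-- str(counter), move the cursor past the marker; the disjunct `w = []` in the guard only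
-- makes the recursion total (Python raised ValueError before the loop; excluded by Pre_).
def pkAltGo (w : List Char) (cs : List Char) (cnt : Int) : List Char :=
  if h : PySem.Chars.find cs w = -1 ∨ w = [] then cs
  else
    cs.take (PySem.Chars.find cs w).toNat ++ (PySem.Int.toStr cnt).toList
      ++ pkAltGo w (cs.drop ((PySem.Chars.find cs w).toNat + w.length)) (cnt + 1)
termination_by cs.length
decreasing_by
  have hne : PySem.Chars.find cs w ≠ -1 := fun hc => h (Or.inl hc)
  have hw : w ≠ [] := fun hc => h (Or.inr hc)
  have h0 : 0 ≤ PySem.Chars.find cs w := by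
    have := PySem.Chars.neg_one_le_find cs w; omega
  have hinf : w <:+: cs := (PySem.Chars.find_nonneg_iff cs w).mp h0
  have hlen : w.length ≤ cs.length := hinf.length_le
  have hwpos : 0 < w.length := List.length_pos_iff.mpr hw
  simp only [List.length_drop]
  omega

def pk_ensure_file_contents_filled_with_auto_no_option2_alt (template_str : String) (word_monitored : String) (auto_cnt_starting_no : Int) : String :=
  if word_monitored = "" then ""   -- Python raises ValueError here; excluded by Pre_
  else String.ofList (pkAltGo word_monitored.toList template_str.toList auto_cnt_starting_no)

-- ===== PRECONDITION & SPEC =====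
-- Pre_ excludes only word_monitored = "", on which BOTH A (str.split('')) and B raise ValueError.
def Pre_pk_ensure_file_contents_filled_with_auto_no_option2 (template_str : String) (word_monitored : String) (auto_cnt_starting_no : Int) : Prop :=
  word_monitored ≠ ""
instance (template_str : String) (word_monitored : String) (auto_cnt_starting_no : Int) : Decidable (Pre_pk_ensure_file_contents_filled_with_auto_no_option2 template_str word_monitored auto_cnt_starting_no) := by unfold Pre_pk_ensure_file_contents_filled_with_auto_no_option2; infer_instance

def pvWitness_pk_ensure_file_contents_filled_with_auto_no_option2 : String × String × Int := ("--1--1--1-", "1", 5)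

def Spec_pk_ensure_file_contents_filled_with_auto_no_option2 (template_str : String) (word_monitored : String) (auto_cnt_starting_no : Int) (out : String) : Prop := out = pk_ensure_file_contents_filled_with_auto_no_option2_alt template_str word_monitored auto_cnt_starting_no
instance (template_str : String) (word_monitored : String) (auto_cnt_starting_no : Int) (out : String) : Decidable (Spec_pk_ensure_file_contents_filled_with_auto_no_option2 template_str word_monitored auto_cnt_starting_no out) := by unfold Spec_pk_ensure_file_contents_filled_with_auto_no_option2; infer_instance

-- ===== CLAIM (what is proved, stated in full; the proofs are below) =====
def Claim_equal_pk_ensure_file_contents_filled_with_auto_no_option2 : Prop := ∀ (template_str : String) (word_monitored : String) (auto_cnt_starting_no : Int), Dom_pk_ensure_file_contents_filled_with_auto_no_option2 template_str word_monitored auto_cnt_starting_no → Pre_pk_ensure_file_contents_filled_with_auto_no_option2 template_str word_monitored auto_cnt_starting_no → Spec_pk_ensure_file_contents_filled_with_auto_no_option2 template_str word_monitored auto_cnt_starting_no (pk_ensure_file_contents_filled_with_auto_no_option2 template_str word_monitored auto_cnt_starting_no)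

-- ===== LEMMAS AND PROOFS =====

def pkPieces (w : List Char) (cs : List Char) : List (List Char) :=
  if h : PySem.Chars.find cs w = -1 ∨ w = [] then [cs]
  else
    cs.take (PySem.Chars.find cs w).toNat
      :: pkPieces w (cs.drop ((PySem.Chars.find cs w).toNat + w.length))
termination_by cs.length
decreasing_by
  have hne : PySem.Chars.find cs w ≠ -1 := fun hc => h (Or.inl hc)
  have hw : w ≠ [] := fun hc => h (Or.inr hc)
  have h0 : 0 ≤ PySem.Chars.find cs w := by
    have := PySem.Chars.neg_one_le_find cs w; omega
  have hinf : w <:+: cs := (PySem.Chars.find_nonneg_iff cs w).mp h0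
  have hlen : w.length ≤ cs.length := hinf.length_le
  have hwpos : 0 < w.length := List.length_pos_iff.mpr hw
  simp only [List.length_drop]; omega
def pkModHead (cur : List Char) : List (List Char) → List (List Char)
  | [] => []
  | p :: r => (cur.reverse ++ p) :: r
def pkJ : Int → List (List Char) → List Char
  | _, [] => []
  | _, [p] => p
  | n, p :: q :: rest => p ++ (PySem.Int.toStr n).toList ++ pkJ (n + 1) (q :: rest)
def pkJS : Int → List String → List String
  | _, [] => []
  | _, [p] => [p]
  | n, p :: q :: rest => (p ++ PySem.Int.toStr n) :: pkJS (n + 1) (q :: rest)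
theorem pkPieces_ne_nil (w cs : List Char) : pkPieces w cs ≠ [] := by
  unfold pkPieces; split <;> simp
theorem pk_prefix_find_zero {w l : List Char} (hp : w <+: l) :
    PySem.Chars.find l w = 0 := by
  have hinf : w <:+: l := hp.isInfix
  have h0 : 0 ≤ PySem.Chars.find l w := (PySem.Chars.find_nonneg_iff l w).mpr hinf
  obtain ⟨hpre, hmin⟩ := PySem.Chars.find_spec h0
  by_cases hz : (PySem.Chars.find l w).toNat = 0
  · omega
  · exact absurd (by simpa using hp) (hmin 0 (by omega))

theorem pk_find_cons_neg {w : List Char} {c : Char} {rest : List Char}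
    (hnp : ¬ w <+: (c :: rest)) (h : PySem.Chars.find rest w = -1) :
    PySem.Chars.find (c :: rest) w = -1 := by
  rw [PySem.Chars.find_eq_neg_one_iff] at h ⊢
  intro hinf
  have : ∃ j, w <+: (c :: rest).drop j := by
    rw [PySem.Chars.exists_prefix_drop_iff_isIn, PySem.Chars.isIn_iff_infix]; exact hinf
  obtain ⟨j, hj⟩ := this
  match j, hj with
  | 0, hj => exact hnp (by simpa using hj)
  | (k+1), hj =>
    apply h
    rw [← PySem.Chars.isIn_iff_infix, ← PySem.Chars.exists_prefix_drop_iff_isIn]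
    exact ⟨k, by simpa using hj⟩

theorem pk_find_cons_pos {w : List Char} {c : Char} {rest : List Char}
    (hnp : ¬ w <+: (c :: rest)) (h : 0 ≤ PySem.Chars.find rest w) :
    PySem.Chars.find (c :: rest) w = PySem.Chars.find rest w + 1 := by
  obtain ⟨hpre, hmin⟩ := PySem.Chars.find_spec h
  have hinf : w <:+: (c :: rest) := by
    rw [← PySem.Chars.isIn_iff_infix, ← PySem.Chars.exists_prefix_drop_iff_isIn]
    exact ⟨(PySem.Chars.find rest w).toNat + 1, by simpa using hpre⟩
  have h0 : 0 ≤ PySem.Chars.find (c :: rest) w := (PySem.Chars.find_nonneg_iff _ w).mpr hinf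
  obtain ⟨hpre', hmin'⟩ := PySem.Chars.find_spec h0
  set i := (PySem.Chars.find (c :: rest) w).toNat with hi
  have hiz : i ≠ 0 := by
    intro hz; rw [hz] at hpre'; exact hnp (by simpa using hpre')
  -- w <+: rest.drop (i-1)
  have hdrop : w <+: rest.drop (i - 1) := by
    have : (c :: rest).drop i = rest.drop (i - 1) := by
      obtain ⟨i', hii⟩ := Nat.exists_eq_succ_of_ne_zero hiz
      rw [hii]; simp
    rwa [this] at hpre'
  have h1 : ¬ (i - 1 < (PySem.Chars.find rest w).toNat) := fun hlt => hmin _ hlt hdrop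
  have h2 : ¬ ((PySem.Chars.find rest w).toNat + 1 < i) := fun hlt =>
    hmin' _ hlt (by simpa using hpre)
  omega

theorem pk_go_spec (w : List Char) (hw : w ≠ []) :
    ∀ (fuel : Nat) (l cur : List Char) (acc : List (List Char)), l.length < fuel →
      PySem.Chars.splitOn.go w fuel l cur acc = acc.reverse ++ pkModHead cur (pkPieces w l) := by
  intro fuel
  induction fuel with
  | zero => intro l cur acc h; omega
  | succ f IH =>
    intro l cur acc hlen
    match l with
    | [] =>
      rw [PySem.Chars.splitOn.go.eq_def]
      have hfind : PySem.Chars.find ([] : List Char) w = -1 := by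
        rw [PySem.Chars.find_eq_neg_one_iff]
        intro hinf
        exact hw (List.eq_nil_of_infix_nil hinf)
      rw [pkPieces]
      simp [hfind, pkModHead]
    | c :: rest =>
      rw [PySem.Chars.splitOn.go.eq_def]
      simp only []
      by_cases hp : w.isPrefixOf (c :: rest) = true
      · have hpre : w <+: (c :: rest) := List.isPrefixOf_iff_prefix.mp hp
        have hwpos : 0 < w.length := List.length_pos_iff.mpr hw
        have hdl : (List.drop w.length (c :: rest)).length < f := by
          have : w.length ≤ (c :: rest).length := hpre.length_le
          simp only [List.length_drop]
          simp at hlen ⊢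
          omega
        rw [if_pos hp, IH _ [] _ hdl]
        have hf0 : PySem.Chars.find (c :: rest) w = 0 := pk_prefix_find_zero hpre
        conv_rhs => rw [pkPieces]
        rw [dif_neg (by simp [hf0, hw])]
        simp only [hf0, Int.toNat_zero, List.take_zero, Nat.zero_add]
        have := pkPieces_ne_nil w (List.drop w.length (c :: rest))
        match hpp : pkPieces w (List.drop w.length (c :: rest)) with
        | [] => exact absurd hpp this
        | p :: r => simp [pkModHead]
      · rw [if_neg hp]
        have hnp : ¬ w <+: (c :: rest) := fun hc => hp (List.isPrefixOf_iff_prefix.mpr hc)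
        have hrl : rest.length < f := by simp at hlen; omega
        rw [IH _ _ _ hrl]
        by_cases hr : PySem.Chars.find rest w = -1
        · have hl : PySem.Chars.find (c :: rest) w = -1 := pk_find_cons_neg hnp hr
          conv_lhs => rw [pkPieces]
          conv_rhs => rw [pkPieces]
          simp [hr, hl, pkModHead]
        · have h0 : 0 ≤ PySem.Chars.find rest w := by
            have := PySem.Chars.neg_one_le_find rest w; omega
          have hl : PySem.Chars.find (c :: rest) w = PySem.Chars.find rest w + 1 :=
            pk_find_cons_pos hnp h0
          conv_lhs => rw [pkPieces]
          conv_rhs => rw [pkPieces]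
          rw [dif_neg (by simp [hr, hw]), dif_neg (by simp [hl, hw]; omega)]
          simp only [pkModHead]
          have htn : (PySem.Chars.find (c :: rest) w).toNat = (PySem.Chars.find rest w).toNat + 1 := by
            rw [hl]; omega
          rw [htn]
          rw [show (PySem.Chars.find rest w).toNat + 1 + w.length
              = ((PySem.Chars.find rest w).toNat + w.length) + 1 from by omega]
          simp [List.take_succ_cons, List.drop_succ_cons]

theorem pk_splitOn_eq_pieces (w cs : List Char) (hw : w ≠ []) :
    PySem.Chars.splitOn cs w = pkPieces w cs := by
  unfold PySem.Chars.splitOn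
  rw [pk_go_spec w hw _ _ _ _ (by omega)]
  have := pkPieces_ne_nil w cs
  match h : pkPieces w cs with
  | [] => exact absurd h this
  | p :: r => simp [pkModHead]

theorem pk_altGo_eq_J (w cs : List Char) (n : Int) :
    pkAltGo w cs n = pkJ n (pkPieces w cs) := by
  rw [pkAltGo, pkPieces]
  split
  · rfl
  · rename_i h
    rw [pk_altGo_eq_J w _ (n+1)]
    have := pkPieces_ne_nil w (cs.drop ((PySem.Chars.find cs w).toNat + w.length))
    match hpp : pkPieces w (cs.drop ((PySem.Chars.find cs w).toNat + w.length)) with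
    | [] => exact absurd hpp this
    | p :: r => simp [pkJ]
termination_by cs.length
decreasing_by
  rename_i h
  have hne : PySem.Chars.find cs w ≠ -1 := fun hc => h (Or.inl hc)
  have hw : w ≠ [] := fun hc => h (Or.inr hc)
  have h0 : 0 ≤ PySem.Chars.find cs w := by
    have := PySem.Chars.neg_one_le_find cs w; omega
  have hinf : w <:+: cs := (PySem.Chars.find_nonneg_iff cs w).mp h0
  have hlen : w.length ≤ cs.length := hinf.length_le
  have hwpos : 0 < w.length := List.length_pos_iff.mpr hw
  simp only [List.length_drop]; omega

theorem pk_foldA (L : Int) (suffix : List String) :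
    ∀ (k n : Int) (acc : List String), k + suffix.length = L →
      ((PySem.List.enumerate suffix k).foldl
        (fun (st : Int × List String) ip =>
          if ip.1 ≠ L - 1 then (st.1 + 1, st.2 ++ [ip.2 ++ PySem.Int.toStr st.1])
          else (st.1, st.2 ++ [ip.2]))
        (n, acc)).2 = acc ++ pkJS n suffix := by
  induction suffix with
  | nil => intro k n acc h; simp [PySem.List.enumerate, pkJS]
  | cons p rest IH =>
    intro k n acc h
    match rest with
    | [] =>
      have hk : k = L - 1 := by simp at h; omega
      simp [PySem.List.enumerate, pkJS, hk]
    | q :: rest' =>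
      have hk : k ≠ L - 1 := by simp at h; omega
      rw [PySem.List.enumerate]
      simp only [List.foldl_cons, if_pos hk]
      rw [IH (k+1) (n+1) _ (by simp at h ⊢; omega)]
      simp [pkJS]

theorem pk_intercalate_nil : ∀ (l : List (List Char)), ([] : List Char).intercalate l = l.flatten
  | [] => by simp [List.intercalate]
  | [a] => by simp [List.intercalate]
  | a :: b :: t => by
    have := pk_intercalate_nil (b :: t)
    simp [List.intercalate] at this ⊢
    simpa using this

theorem pk_JS_toList (n : Int) (ps : List String) :
    PySem.Chars.join [] ((pkJS n ps).map String.toList) = pkJ n (ps.map String.toList) := by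
  induction ps generalizing n with
  | nil => simp [pkJS, pkJ, PySem.Chars.join, pk_intercalate_nil]
  | cons p rest IH =>
    match rest with
    | [] => simp [pkJS, pkJ, PySem.Chars.join, pk_intercalate_nil]
    | q :: rest' =>
      rw [pkJS]
      simp only [List.map_cons, PySem.Chars.join, pk_intercalate_nil, List.flatten_cons] at IH ⊢
      rw [IH]
      simp [pkJ]

theorem pk_ensure_file_contents_filled_with_auto_no_option2_spec : Claim_equal_pk_ensure_file_contents_filled_with_auto_no_option2 := by
  intro t w n _ hpre
  unfold Spec_pk_ensure_file_contents_filled_with_auto_no_option2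
  unfold Pre_pk_ensure_file_contents_filled_with_auto_no_option2 at hpre
  have hwl : w.toList ≠ [] := by simp [hpre]
  unfold pk_ensure_file_contents_filled_with_auto_no_option2
  unfold pk_ensure_file_contents_filled_with_auto_no_option2_alt
  rw [if_neg hpre]
  have hsplit : PySem.Str.split? t w
      = some ((PySem.Chars.splitOn t.toList w.toList).map String.ofList) := by
    unfold PySem.Str.split? PySem.Chars.split?
    rw [if_neg (by simpa using hwl)]
    rfl
  rw [hsplit]
  simp only []
  rw [pk_foldA ((((PySem.Chars.splitOn t.toList w.toList).map String.ofList).length : Int))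
      _ 0 n [] (by simp)]
  unfold PySem.Str.join
  congr 1
  simp only [List.nil_append]
  rw [show ("" : String).toList = [] from rfl]
  rw [pk_JS_toList]
  rw [show ((PySem.Chars.splitOn t.toList w.toList).map String.ofList).map String.toList
      = PySem.Chars.splitOn t.toList w.toList from by
    simp [List.map_map, Function.comp_def]]
  rw [pk_splitOn_eq_pieces _ _ hwl, ← pk_altGo_eq_J]
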